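-- pv_equiv track=rewrite | github.com/sekeyWang/A4 | database.py | trypsin_cut
-- ===== SOURCE A (Python) =====
-- def trypsin_cut(protein):
--     peptide_list = []
--     peptide = ""
--     for idx, aa in enumerate(protein):
--         peptide += aa
--         if aa == 'R' or aa == 'K':
--             if idx + 1 < len(protein) and protein[idx + 1] != 'P':
--                 peptide_list.append(peptide)
--                 peptide = ""
--     return peptide_list
-- ===== SOURCE B (Python) =====
-- def trypsin_cut(protein):
--     # Boundary-scan decomposition: collect cut positions, then slice between them
--     # (no trailing segment after the last cut, matching A's behaviour).
--     cuts = [i + 1 for i in range(len(protein) - 1)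
--             if (protein[i] == 'R' or protein[i] == 'K') and protein[i + 1] != 'P']
--     pieces = []
--     prev = 0
--     for c in cuts:
--         pieces.append(protein[prev:c])
--         prev = c
--     return pieces
-- ===== Notes on version B (the rewrite author's own statement) =====
-- stated objective: alternative
-- what changed: B first scans once for cut boundaries (indices after R/K not followed by P) and then builds the peptides by slicing between consecutive boundaries, instead of A's running-accumulator loop; the trailing segment after the last boundary is never emitted, matching A.
import Mathlib
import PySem

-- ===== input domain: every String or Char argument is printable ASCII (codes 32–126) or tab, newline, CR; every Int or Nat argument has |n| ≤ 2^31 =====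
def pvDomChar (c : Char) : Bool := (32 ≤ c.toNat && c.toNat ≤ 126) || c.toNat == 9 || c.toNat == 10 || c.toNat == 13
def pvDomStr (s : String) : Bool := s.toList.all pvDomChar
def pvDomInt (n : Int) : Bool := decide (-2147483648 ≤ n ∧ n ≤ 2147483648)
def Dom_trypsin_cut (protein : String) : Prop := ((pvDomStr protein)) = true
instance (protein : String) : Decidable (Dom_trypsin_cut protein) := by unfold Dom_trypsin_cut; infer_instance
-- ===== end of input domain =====

-- B differs from A only in decomposition: one boundary scan, then slicing; equal output everywhere.

-- ===== PORT A =====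
-- A's loop body: accumulate the current peptide; flush it when aa ∈ {R,K} and the next char exists and is not P.
def aBody (cs : List Char) (st : List (List Char) × List Char) (p : Int × Char) :
    List (List Char) × List Char :=
  let pep := st.2 ++ [p.2]
  if (p.2 = 'R' ∨ p.2 = 'K') ∧ (p.1 + 1 < (cs.length : Int) ∧ PySem.List.pyGet? cs (p.1 + 1) ≠ some 'P')
  then (st.1 ++ [pep], ([] : List Char))
  else (st.1, pep)

def trypsin_cut (protein : String) : List String :=
  let cs := protein.toList
  let st := (PySem.List.enumerate cs 0).foldl (aBody cs) ([], [])
  st.1.map String.mk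

-- ===== PORT B =====
-- B's slicing step: append protein[prev:c], move prev to c.
def bStep (cs : List Char) (st : List (List Char) × Int) (c : Int) : List (List Char) × Int :=
  (st.1 ++ [PySem.List.slice cs (some st.2) (some c)], c)

def trypsin_cut_alt (protein : String) : List String :=
  let cs := protein.toList
  let cuts := ((PySem.List.pyRange 0 ((cs.length : Int) - 1) 1).filter
      (fun i => decide ((PySem.List.pyGetD cs i ' ' = 'R' ∨ PySem.List.pyGetD cs i ' ' = 'K') ∧
                        PySem.List.pyGetD cs (i + 1) ' ' ≠ 'P'))).map (· + 1)
  let st := cuts.foldl (bStep cs) ([], 0)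
  st.1.map String.mk

-- ===== PRECONDITION & SPEC =====
def Spec_trypsin_cut (protein : String) (out : List String) : Prop := out = trypsin_cut_alt protein
instance (protein : String) (out : List String) : Decidable (Spec_trypsin_cut protein out) := by unfold Spec_trypsin_cut; infer_instance

-- ===== CLAIM (what is proved, stated in full; the proofs are below) =====
def Claim_equal_trypsin_cut : Prop := ∀ (protein : String), Dom_trypsin_cut protein → Spec_trypsin_cut protein (trypsin_cut protein)

-- ===== LEMMAS AND PROOFS =====

-- cut condition between two adjacent characters
def condC (a b : Char) : Bool := (a == 'R' || a == 'K') && b != 'P'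

-- boundary list (Nat form of B's comprehension)
def cutsF (cs : List Char) : List Nat :=
  ((List.range (cs.length - 1)).filter
    (fun i => condC (cs.getD i ' ') (cs.getD (i + 1) ' '))).map (· + 1)

-- slices between consecutive boundaries (Nat form of B's loop)
def slicesF (cs : List Char) (prev : Nat) : List Nat → List (List Char)
  | [] => []
  | c :: rest => (cs.drop prev).take (c - prev) :: slicesF cs c rest

-- index-free form of A's loop
def segs (pep : List Char) : List Char → List (List Char)
  | [] => []
  | a :: rest =>
    if condC a (rest.headD 'P')
    then (pep ++ [a]) :: segs [] rest
    else segs (pep ++ [a]) rest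


theorem cond_decide (a b : Char) :
    decide ((a = 'R' ∨ a = 'K') ∧ b ≠ 'P') = condC a b := by
  by_cases hR : a = 'R' <;> by_cases hK : a = 'K' <;> by_cases hP : b = 'P' <;>
    simp [condC, hR, hK, hP]

theorem L_shift (l : List Nat) (t : List Char) (a : Char) (prev : Nat) :
    slicesF (a :: t) (prev + 1) (l.map (· + 1)) = slicesF t prev l := by
  induction l generalizing prev with
  | nil => rfl
  | cons c l ih =>
    simp only [List.map_cons, slicesF, List.drop_succ_cons]
    rw [show c + 1 - (prev + 1) = c - prev by omega, ih]

theorem L_shift0 (l : List Nat) (t : List Char) (a : Char) :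
    slicesF (a :: t) 0 (l.map (· + 1)) = List.modifyHead (a :: ·) (slicesF t 0 l) := by
  cases l with
  | nil => rfl
  | cons c l =>
    simp only [List.map_cons, slicesF, List.modifyHead, Nat.sub_zero, List.drop_zero,
      List.take_succ_cons]
    rw [show c + 1 = c + 1 - 0 by omega] -- noop guard
    simp only [Nat.sub_zero]
    rw [L_shift]

theorem L_cuts_cons (a b : Char) (rest : List Char) :
    cutsF (a :: b :: rest)
      = (if condC a b then [1] else []) ++ (cutsF (b :: rest)).map (· + 1) := by
  unfold cutsF
  simp only [List.length_cons, Nat.add_sub_cancel, List.range_succ_eq_map,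
    List.filter_cons, List.getD_cons_zero, List.getD_cons_succ, List.filter_map]
  cases h : condC a b <;>
    simp [Function.comp_def, List.map_map, Nat.succ_eq_add_one]

theorem segs_cons (pep : List Char) (a : Char) (rest : List Char) :
    segs pep (a :: rest)
      = if condC a (rest.headD 'P') then (pep ++ [a]) :: segs [] rest
        else segs (pep ++ [a]) rest := by
  rw [segs]

theorem L_segs (cs pep : List Char) :
    segs pep cs = List.modifyHead (pep ++ ·) (slicesF cs 0 (cutsF cs)) := by
  induction cs generalizing pep with
  | nil => simp [segs, cutsF, slicesF]
  | cons a rest ih =>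
    cases rest with
    | nil => simp [segs, condC, cutsF, slicesF]
    | cons b t =>
      rw [L_cuts_cons]
      cases h : condC a b with
      | true =>
        simp only [if_true]
        rw [segs_cons]
        simp only [List.headD_cons, h, if_true]
        rw [ih]
        simp only [List.cons_append, List.nil_append, slicesF, List.drop_zero,
          Nat.sub_zero, List.take_succ_cons, List.take_zero]
        rw [show slicesF (a :: b :: t) 1 (List.map (fun x => x + 1) (cutsF (b :: t)))
              = slicesF (b :: t) 0 (cutsF (b :: t)) from L_shift _ _ _ 0]
        cases hx : slicesF (b :: t) 0 (cutsF (b :: t)) <;> rfl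
      | false =>
        rw [if_neg Bool.false_ne_true, List.nil_append]
        rw [segs_cons]
        simp only [List.headD_cons, h, Bool.false_eq_true, if_false]
        rw [ih, L_shift0]
        cases hx : slicesF (b :: t) 0 (cutsF (b :: t)) <;> simp [List.modifyHead]


theorem L_afold (suf pre : List Char) (acc : List (List Char)) (pep : List Char) :
    ((PySem.List.enumerate suf (pre.length : Int)).foldl (aBody (pre ++ suf)) (acc, pep)).1
      = acc ++ segs pep suf := by
  induction suf generalizing pre acc pep with
  | nil => simp [PySem.List.enumerate, segs]
  | cons a rest ih =>
    rw [PySem.List.enumerate_cons, List.foldl_cons]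
    have hcond : ((a = 'R' ∨ a = 'K') ∧ ((pre.length : Int) + 1 < ((pre ++ a :: rest).length : Int) ∧
        PySem.List.pyGet? (pre ++ a :: rest) ((pre.length : Int) + 1) ≠ some 'P'))
        ↔ condC a (rest.headD 'P') = true := by
      cases rest with
      | nil =>
        simp only [condC, List.headD_nil, List.length_append, List.length_cons, List.length_nil]
        constructor
        · rintro ⟨-, h, -⟩; push_cast at h; omega
        · intro h; simp at h
      | cons b t =>
        have h1 : pre ++ a :: b :: t = (pre ++ [a]) ++ b :: t := by simp
        have h2 : ((pre.length : Int) + 1) = (((pre ++ [a]).length : Nat) : Int) := by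
          simp
        rw [h1, h2, PySem.List.pyGet?_append_length]
        simp only [condC, List.headD_cons, List.length_append, List.length_cons]
        constructor
        · rintro ⟨h3, -, h4⟩
          have hb : b ≠ 'P' := fun hbp => h4 (by rw [hbp])
          rcases h3 with h3 | h3 <;> simp [h3, hb]
        · intro h
          simp only [Bool.and_eq_true, Bool.or_eq_true, beq_iff_eq, bne_iff_ne] at h
          refine ⟨h.1, by push_cast; omega, by simpa using h.2⟩
    cases h : condC a (rest.headD 'P') with
    | true =>
      have hif : aBody (pre ++ a :: rest) (acc, pep) ((pre.length : Int), a)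
          = (acc ++ [pep ++ [a]], ([] : List Char)) := by
        simp only [aBody]
        rw [if_pos (hcond.mpr h)]
      rw [hif]
      have h1 : pre ++ a :: rest = (pre ++ [a]) ++ rest := by simp
      have h2 : ((pre.length : Int) + 1) = (((pre ++ [a]).length : Nat) : Int) := by simp
      rw [h1, h2, ih]
      rw [segs_cons, if_pos h]
      simp
    | false =>
      have hif : aBody (pre ++ a :: rest) (acc, pep) ((pre.length : Int), a)
          = (acc, pep ++ [a]) := by
        simp only [aBody]
        rw [if_neg (by rw [hcond, h]; simp)]
      rw [hif]
      have h1 : pre ++ a :: rest = (pre ++ [a]) ++ rest := by simp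
      have h2 : ((pre.length : Int) + 1) = (((pre ++ [a]).length : Nat) : Int) := by simp
      rw [h1, h2, ih]
      rw [segs_cons, if_neg (fun hc => Bool.noConfusion (h.symm.trans hc))]

theorem L_bfold (cs : List Char) (l : List Nat) (acc : List (List Char)) (prev : Nat) :
    ((l.map (Nat.cast : Nat → Int)).foldl (bStep cs) (acc, (prev : Int))).1
      = acc ++ slicesF cs prev l := by
  induction l generalizing acc prev with
  | nil => simp [slicesF]
  | cons c l ih =>
    simp only [List.map_cons, List.foldl_cons, bStep, PySem.List.slice_natCast, slicesF]
    rw [ih]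
    simp

theorem L_bcuts (cs : List Char) :
    ((PySem.List.pyRange 0 ((cs.length : Int) - 1) 1).filter
        (fun i => decide ((PySem.List.pyGetD cs i ' ' = 'R' ∨ PySem.List.pyGetD cs i ' ' = 'K') ∧
                          PySem.List.pyGetD cs (i + 1) ' ' ≠ 'P'))).map (· + 1)
      = (cutsF cs).map (Nat.cast : Nat → Int) := by
  cases cs with
  | nil => rfl
  | cons c cs' =>
    have hn : (((c :: cs').length : Int) - 1) = ((cs'.length : Nat) : Int) := by
      simp
    rw [hn, PySem.List.pyRange_zero_natCast, List.filter_map]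
    unfold cutsF
    simp only [List.length_cons, Nat.add_sub_cancel, List.map_map]
    congr 1
    · congr 1
      funext i
      simp only [Function.comp_def, show ((i : Int) + 1) = (((i + 1 : Nat)) : Int) by push_cast; ring,
        PySem.List.pyGetD_natCast, cond_decide]

-- ===== VERDICT (by name: the statement is the Claim_ definition above) =====
theorem trypsin_cut_spec : Claim_equal_trypsin_cut := by
  intro protein _
  simp only [Spec_trypsin_cut, trypsin_cut, trypsin_cut_alt]
  have ha := L_afold protein.toList [] [] []
  simp only [List.length_nil, Nat.cast_zero, List.nil_append] at ha
  rw [ha, L_bcuts]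
  have hb := L_bfold protein.toList (cutsF protein.toList) [] 0
  simp only [Nat.cast_zero, List.nil_append] at hb
  rw [hb, L_segs]
  cases slicesF protein.toList 0 (cutsF protein.toList) <;> rfl
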